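-- pv_equiv track=rewrite | github.com/juanpsm/pythonUNLP | p1e6.py | cuentaLetra
-- ===== SOURCE A (Python) =====
-- def cuentaLetra(s): #funcion para contar letras de las palabras y ademas marcarlas para sacarle la coma o el punto
-- 	c = 0
-- 	for L in s:
-- 		if ((L != ',') and (L != '.')):
-- 			c+=1
-- 		else:
-- 			c=-1
-- 	return c
-- ===== SOURCE B (Python) =====
-- def cuentaLetra(s):
--     last = max(s.rfind(','), s.rfind('.'))
--     return len(s) if last == -1 else len(s) - last - 2
-- ===== Notes on version B (the rewrite author's own statement) =====
-- stated objective: faster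
-- what changed: Replaces the character-by-character counting loop with closed-form arithmetic on the index of the last comma/period (rfind): len(s) if none, else len(s)-last-2.
import Mathlib
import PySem

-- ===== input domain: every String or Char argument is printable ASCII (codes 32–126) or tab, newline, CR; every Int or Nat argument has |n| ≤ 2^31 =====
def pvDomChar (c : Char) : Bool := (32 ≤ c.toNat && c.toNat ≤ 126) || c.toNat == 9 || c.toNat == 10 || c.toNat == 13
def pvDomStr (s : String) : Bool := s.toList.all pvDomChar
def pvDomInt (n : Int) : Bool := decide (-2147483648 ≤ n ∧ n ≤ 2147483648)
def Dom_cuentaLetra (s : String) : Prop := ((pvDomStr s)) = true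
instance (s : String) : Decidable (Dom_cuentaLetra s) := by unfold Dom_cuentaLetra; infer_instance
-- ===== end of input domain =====

-- B replaces A's reset-to-(-1) counting loop with closed-form arithmetic on the
-- index of the last ','/'.' (rfind): simpler, same O(n) cost.


-- ===== PORT A =====
-- for L in s: if L != ',' and L != '.': c += 1 else: c = -1
def cuentaLetra (s : String) : Int :=
  s.toList.foldl (fun c L => if L ≠ ',' ∧ L ≠ '.' then c + 1 else -1) 0

-- ===== PORT B =====
-- s.rfind(ch): index of the last occurrence of ch, -1 if absent (single-char needle)
def pvRfindAux (ch : Char) (st : Int × Int) (L : Char) : Int × Int :=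
  ((if L = ch then st.2 else st.1), st.2 + 1)

def pvRfind (s : String) (ch : Char) : Int :=
  (s.toList.foldl (pvRfindAux ch) (-1, 0)).1

-- last = max(s.rfind(','), s.rfind('.')); len(s) if last == -1 else len(s) - last - 2
def cuentaLetra_alt (s : String) : Int :=
  let last := max (pvRfind s ',') (pvRfind s '.')
  if last = -1 then (s.toList.length : Int) else (s.toList.length : Int) - last - 2

-- ===== PRECONDITION & SPEC =====
def Spec_cuentaLetra (s : String) (out : Int) : Prop := out = cuentaLetra_alt s
instance (s : String) (out : Int) : Decidable (Spec_cuentaLetra s out) := by unfold Spec_cuentaLetra; infer_instance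

-- ===== CLAIM (what is proved, stated in full; the proofs are below) =====
def Claim_equal_cuentaLetra : Prop := ∀ (s : String), Dom_cuentaLetra s → Spec_cuentaLetra s (cuentaLetra s)

-- ===== LEMMAS AND PROOFS =====

-- the second component of the rfind fold counts the characters seen
theorem pvRfind_snd (ch : Char) (l : List Char) (a i : Int) :
    (l.foldl (pvRfindAux ch) (a, i)).2 = i + l.length := by
  induction l generalizing a i with
  | nil => simp
  | cons x xs ih => simp [pvRfindAux, ih]; omega

theorem pvRfind_append (ch x : Char) (l : List Char) :
    (List.foldl (pvRfindAux ch) (-1, 0) (l ++ [x])).1 =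
      if x = ch then (l.length : Int) else (List.foldl (pvRfindAux ch) (-1, 0) l).1 := by
  rw [List.foldl_append]
  have h := pvRfind_snd ch l (-1) 0
  simp [pvRfindAux, h]

-- rfind's result is between -1 and length - 1
theorem pvRfind_bounds (ch : Char) (l : List Char) :
    -1 ≤ (List.foldl (pvRfindAux ch) (-1, 0) l).1 ∧
      (List.foldl (pvRfindAux ch) (-1, 0) l).1 ≤ (l.length : Int) - 1 := by
  induction l using List.reverseRecOn with
  | nil => simp
  | append_singleton l x ih =>
    rw [pvRfind_append]
    simp only [List.length_append, List.length_cons, List.length_nil]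
    split_ifs <;> push_cast <;> omega

theorem cuentaLetra_foldl_eq (l : List Char) :
    l.foldl (fun c L => if L ≠ ',' ∧ L ≠ '.' then c + 1 else -1) 0 =
      (let last := max (List.foldl (pvRfindAux ',') (-1, 0) l).1
                       (List.foldl (pvRfindAux '.') (-1, 0) l).1
       if last = -1 then (l.length : Int) else (l.length : Int) - last - 2) := by
  induction l using List.reverseRecOn with
  | nil => simp
  | append_singleton l x ih =>
    rw [List.foldl_append, List.foldl_cons, List.foldl_nil, ih]
    simp only [pvRfind_append, List.length_append, List.length_cons, List.length_nil,
      Nat.cast_add, Nat.cast_one, zero_add]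
    obtain ⟨hc1, hc2⟩ := pvRfind_bounds ',' l
    obtain ⟨hd1, hd2⟩ := pvRfind_bounds '.' l
    by_cases h1 : x = ','
    · subst h1
      rw [if_pos rfl, if_neg (by decide : ¬(',' : Char) = '.'),
        if_neg (by decide : ¬((',' : Char) ≠ ',' ∧ (',' : Char) ≠ '.')),
        max_eq_left (by omega), if_neg (by omega)]
      omega
    · by_cases h2 : x = '.'
      · subst h2
        rw [if_neg (by decide : ¬('.' : Char) = ','), if_pos rfl,
          if_neg (by decide : ¬(('.' : Char) ≠ ',' ∧ ('.' : Char) ≠ '.')),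
          max_eq_right (by omega), if_neg (by omega)]
        omega
      · rw [if_neg h1, if_neg h2, if_pos ⟨h1, h2⟩]
        by_cases h : max (List.foldl (pvRfindAux ',') (-1, 0) l).1
            (List.foldl (pvRfindAux '.') (-1, 0) l).1 = -1
        · rw [if_pos h, if_pos h]
        · rw [if_neg h, if_neg h]
          rcases le_total (List.foldl (pvRfindAux ',') (-1, 0) l).1
              (List.foldl (pvRfindAux '.') (-1, 0) l).1 with hle | hle
          · rw [max_eq_right hle] at *; omega
          · rw [max_eq_left hle] at *; omega

-- ===== VERDICT (by name: the statement is the Claim_ definition above) =====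
theorem cuentaLetra_spec : Claim_equal_cuentaLetra := by
  intro s _
  show _ = _
  unfold cuentaLetra cuentaLetra_alt pvRfind
  exact cuentaLetra_foldl_eq s.toList
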